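-- pv_equiv track=rewrite | github.com/L-Zipeng/Global_LCF_TEA | global tea/analysis/comprehensive_sensitivity_analysis.py | get_ordered_technologies
-- ===== SOURCE A (Python) =====
-- def get_ordered_technologies(available_techs):
--     """
--     Orders technologies according to the complete list used in aggregatedplot.py
--     Organized by technology groups: Hydrogen, Kerosene, Diesel, Other Fuels
--
--     Note: Base technology names (e.g., ST_FT) are excluded if fuel-specific variants exist
--     (e.g., ST_FT_kerosene, ST_FT_diesel) to avoid duplication
--     """
--     # Complete technology order - EXCLUDES base technology names when fuel-specific variants exist
--     complete_tech_order = [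
--         # Hydrogen technologies (Green, Pink, Blue, Turquoise, Bio)
--         'AE', 'PEM', 'SOEC',           # Green H2
--         'HTSE', 'CuCl',                # Pink H2
--         'SMR_CCS', 'ATR_CCS', 'CLR',   # Blue H2
--         'M_PYR',                       # Turquoise H2
--         'TG_CCS',                      # Bio H2
--
--         # Single-fuel technologies (no fuel variants)
--         'HTL',                         # Hydrothermal liquefaction
--
--         # Fuel-specific technologies (ONLY fuel-specific, NOT base names)
--         'SR_FT_kerosene', 'ST_FT_kerosene',              # Solar kerosene
--         'TG_FT_kerosene', 'HVO_kerosene', 'B_PYR_kerosene',  # Bio kerosene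
--         'RWGS_FT_kerosene', 'RWGS_MeOH_kerosene',        # Power-to-Liquid kerosene
--         'SR_FT_diesel', 'ST_FT_diesel',                  # Solar Diesel
--         'TG_FT_diesel', 'HVO_diesel',                    # Bio Diesel
--         'RWGS_FT_diesel',                                # Power-to-Liquid Diesel
--         'RWGS_MeOH_methanol', 'RWGS_MeOH_DME',           # Other methanol products
--
--         # Other fuels (Ammonia, Methane)
--         'HB',                          # Ammonia
--         'PTM', 'AD',                   # Methane
--
--         # Additional technologies that might appear in data
--         'DAC'                          # Direct Air Capture
--     ]
--
--     # Filter to only include technologies available in the data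
--     ordered_techs = [tech for tech in complete_tech_order if tech in available_techs]
--
--     # Add any technologies that might be in results but not in the predefined order
--     for tech in available_techs:
--         if tech not in ordered_techs:
--             ordered_techs.append(tech)
--
--     return ordered_techs
-- ===== SOURCE B (Python) =====
-- def get_ordered_technologies(available_techs):
--     complete_tech_order = [
--         'AE', 'PEM', 'SOEC',
--         'HTSE', 'CuCl',
--         'SMR_CCS', 'ATR_CCS', 'CLR',
--         'M_PYR',
--         'TG_CCS',
--         'HTL',
--         'SR_FT_kerosene', 'ST_FT_kerosene',
--         'TG_FT_kerosene', 'HVO_kerosene', 'B_PYR_kerosene',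
--         'RWGS_FT_kerosene', 'RWGS_MeOH_kerosene',
--         'SR_FT_diesel', 'ST_FT_diesel',
--         'TG_FT_diesel', 'HVO_diesel',
--         'RWGS_FT_diesel',
--         'RWGS_MeOH_methanol', 'RWGS_MeOH_DME',
--         'HB',
--         'PTM', 'AD',
--         'DAC'
--     ]
--     n = len(complete_tech_order)
--     uniq = list(dict.fromkeys(available_techs))
--     def key(t):
--         return complete_tech_order.index(t) if t in complete_tech_order else n + uniq.index(t)
--     return sorted(uniq, key=key)
-- ===== Notes on version B (the rewrite author's own statement) =====
-- stated objective: alternative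
-- what changed: Replaces A's filter-the-reference-list-then-scan-and-append loop by an ordered dedup (dict.fromkeys) followed by one stable sort under a rank key (position in the reference list, extras ranked after it by first occurrence).
import Mathlib
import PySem

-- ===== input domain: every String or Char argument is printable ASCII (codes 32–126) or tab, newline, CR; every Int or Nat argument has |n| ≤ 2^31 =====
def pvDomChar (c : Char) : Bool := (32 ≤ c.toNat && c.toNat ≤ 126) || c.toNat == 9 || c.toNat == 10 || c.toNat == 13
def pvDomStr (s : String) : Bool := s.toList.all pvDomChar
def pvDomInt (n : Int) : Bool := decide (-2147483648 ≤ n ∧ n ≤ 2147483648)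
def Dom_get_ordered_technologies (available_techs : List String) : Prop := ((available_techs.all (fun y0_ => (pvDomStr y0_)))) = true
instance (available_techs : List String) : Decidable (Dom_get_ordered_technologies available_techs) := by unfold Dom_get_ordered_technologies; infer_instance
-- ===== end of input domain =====

-- B replaces A's filter-then-scan-append strategy by ordered dedup + one stable sort under a rank key (alternative decomposition, similar cost).

-- ===== PORT A =====
-- the module's complete_tech_order constant (shared spelling of the literal; each port uses it as its own local list)
def pvOrder : List String :=
  ["AE", "PEM", "SOEC", "HTSE", "CuCl", "SMR_CCS", "ATR_CCS", "CLR", "M_PYR", "TG_CCS",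
   "HTL",
   "SR_FT_kerosene", "ST_FT_kerosene", "TG_FT_kerosene", "HVO_kerosene", "B_PYR_kerosene",
   "RWGS_FT_kerosene", "RWGS_MeOH_kerosene", "SR_FT_diesel", "ST_FT_diesel",
   "TG_FT_diesel", "HVO_diesel", "RWGS_FT_diesel", "RWGS_MeOH_methanol", "RWGS_MeOH_DME",
   "HB", "PTM", "AD", "DAC"]

def get_ordered_technologies (available_techs : List String) : List String :=
  let complete_tech_order := pvOrder
  -- [tech for tech in complete_tech_order if tech in available_techs]
  let ordered_techs := complete_tech_order.filter (fun tech => decide (tech ∈ available_techs))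
  -- for tech in available_techs: if tech not in ordered_techs: ordered_techs.append(tech)
  available_techs.foldl (fun acc tech => if tech ∉ acc then acc ++ [tech] else acc) ordered_techs

-- ===== PORT B =====
-- key(t) = complete_tech_order.index(t) if t in complete_tech_order else n + uniq.index(t)
-- (.index is PySem.List.index?; the getD 0 is unreachable: the then-branch is guarded by membership,
--  and sorted applies key only to members of uniq)
def pvKey (uniq : List String) (t : String) : Int :=
  if t ∈ pvOrder then (((PySem.List.index? pvOrder t).getD 0 : Nat) : Int)
  else ((pvOrder.length : Nat) : Int) + (((PySem.List.index? uniq t).getD 0 : Nat) : Int)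

def get_ordered_technologies_alt (available_techs : List String) : List String :=
  let uniq := PySem.List.dedup available_techs   -- list(dict.fromkeys(available_techs))
  PySem.List.sorted uniq (pvKey uniq) false

-- ===== PRECONDITION & SPEC =====
def Spec_get_ordered_technologies (available_techs : List String) (out : List String) : Prop := out = get_ordered_technologies_alt available_techs
instance (available_techs : List String) (out : List String) : Decidable (Spec_get_ordered_technologies available_techs out) := by unfold Spec_get_ordered_technologies; infer_instance

-- ===== CLAIM (what is proved, stated in full; the proofs are below) =====
def Claim_equal_get_ordered_technologies : Prop := ∀ (available_techs : List String), Dom_get_ordered_technologies available_techs → Spec_get_ordered_technologies available_techs (get_ordered_technologies available_techs)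


-- ===== LEMMAS AND PROOFS =====

-- A's append-if-new step IS PySem.Set.add
lemma pv_step_eq_add :
    (fun (acc : List String) t => if t ∉ acc then acc ++ [t] else acc) = PySem.Set.add := by
  funext acc t
  by_cases h : t ∈ acc <;> simp [PySem.Set.add, h]

-- Set.add-accumulation extends acc by the not-yet-seen elements, in first-occurrence order
lemma pv_addfold (xs : List String) : ∀ (acc : List String),
    xs.foldl PySem.Set.add acc
      = acc ++ (xs.foldl PySem.Set.add []).filter (fun t => decide (t ∉ acc)) := by
  induction xs with
  | nil => intro acc; simp
  | cons x xs ih =>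
    intro acc
    have hx1 : PySem.Set.add ([] : List String) x = [x] := by simp [PySem.Set.add]
    have hD : xs.foldl PySem.Set.add [x]
        = x :: (xs.foldl PySem.Set.add []).filter (fun t => decide (t ∉ [x])) := by
      rw [ih [x]]; rfl
    simp only [List.foldl_cons, hx1, hD]
    rw [ih (PySem.Set.add acc x)]
    by_cases h : x ∈ acc
    · have : PySem.Set.add acc x = acc := by simp [PySem.Set.add, h]
      rw [this]
      simp only [List.filter_cons]
      have hxd : (decide (x ∉ acc)) = false := by simp [h]
      rw [hxd]
      simp only [List.filter_filter]
      congr 1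
      apply List.filter_congr
      intro t _
      by_cases ht : t ∈ acc
      · simp [ht]
      · have : t ≠ x := by rintro rfl; exact ht h
        simp [ht, this]
    · have : PySem.Set.add acc x = acc ++ [x] := by simp [PySem.Set.add, h]
      rw [this]
      simp only [List.filter_cons]
      have hxd : (decide (x ∉ acc)) = true := by simp [h]
      rw [hxd]
      simp only [List.filter_filter, List.append_assoc, List.cons_append, List.nil_append]
      congr 2
      apply List.filter_congr
      intro t _
      by_cases ht : t ∈ acc <;> by_cases htx : t = x <;> simp [ht, htx]

-- A's result, as filter-of-order ++ extras-in-first-occurrence order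
lemma pv_A_eq (a : List String) :
    get_ordered_technologies a
      = pvOrder.filter (fun t => decide (t ∈ a))
        ++ (PySem.List.dedup a).filter (fun t => decide (t ∉ pvOrder)) := by
  show a.foldl (fun acc tech => if tech ∉ acc then acc ++ [tech] else acc)
        (pvOrder.filter (fun tech => decide (tech ∈ a))) = _
  rw [pv_step_eq_add, pv_addfold]
  have hded : PySem.List.dedup a = a.foldl PySem.Set.add [] := by
    simp [PySem.List.dedup_eq_ofList, PySem.Set.ofList_eq_foldl]
  rw [← hded]
  congr 1
  apply List.filter_congr
  intro t ht
  have hta : t ∈ a := (PySem.List.mem_dedup a t).mp ht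
  refine decide_eq_decide.mpr (not_congr ?_)
  exact ⟨fun h => (List.mem_filter.mp h).1, fun h => List.mem_filter.mpr ⟨h, by simpa using hta⟩⟩

-- nodup list: earlier elements have a smaller .index
lemma pv_pairwise_rank (l : List String) (h : l.Nodup) :
    l.Pairwise (fun s t => (PySem.List.index? l s).getD 0 < (PySem.List.index? l t).getD 0) := by
  induction l with
  | nil => exact List.Pairwise.nil
  | cons x xs ih =>
    rcases List.nodup_cons.mp h with ⟨hx, hxs⟩
    refine List.Pairwise.cons ?_ ?_
    · intro t ht
      have hne : x ≠ t := fun e => hx (e ▸ ht)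
      rw [PySem.List.index?_cons_self, PySem.List.index?_cons_of_ne xs hne]
      rcases Option.isSome_iff_exists.mp ((PySem.List.index?_isSome_iff xs t).mpr ht) with ⟨k, hk⟩
      rw [hk]; simp
    · refine (ih hxs).imp_of_mem ?_
      intro s t hs ht hlt
      have hns : x ≠ s := fun e => hx (e ▸ hs)
      have hnt : x ≠ t := fun e => hx (e ▸ ht)
      rw [PySem.List.index?_cons_of_ne xs hns, PySem.List.index?_cons_of_ne xs hnt]
      rcases Option.isSome_iff_exists.mp ((PySem.List.index?_isSome_iff xs s).mpr hs) with ⟨i, hi⟩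
      rcases Option.isSome_iff_exists.mp ((PySem.List.index?_isSome_iff xs t).mpr ht) with ⟨j, hj⟩
      rw [hi, hj] at hlt ⊢
      simp at hlt ⊢
      omega

lemma pvOrder_nodup : pvOrder.Nodup := by decide

-- B's result equals the same characterization: F ++ E is a strictly key-increasing rearrangement of dedup a
lemma pv_B_eq (a : List String) :
    get_ordered_technologies_alt a
      = pvOrder.filter (fun t => decide (t ∈ a))
        ++ (PySem.List.dedup a).filter (fun t => decide (t ∉ pvOrder)) := by
  set U := PySem.List.dedup a with hU
  set F := pvOrder.filter (fun t => decide (t ∈ a)) with hF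
  set E := U.filter (fun t => decide (t ∉ pvOrder)) with hE
  have hmemF : ∀ {t}, t ∈ F → t ∈ pvOrder ∧ t ∈ a := by
    intro t ht; rw [hF, List.mem_filter] at ht; exact ⟨ht.1, by simpa using ht.2⟩
  have hmemE : ∀ {t}, t ∈ E → t ∈ U ∧ t ∉ pvOrder := by
    intro t ht; rw [hE, List.mem_filter] at ht; exact ⟨ht.1, by simpa using ht.2⟩
  have hperm : (F ++ E).Perm U := by
    rw [List.perm_ext_iff_of_nodup ?_ (PySem.List.nodup_dedup a)]
    · intro t
      constructor
      · intro ht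
        rcases List.mem_append.mp ht with h | h
        · exact (PySem.List.mem_dedup a t).mpr (hmemF h).2
        · exact (hmemE h).1
      · intro ht
        by_cases ho : t ∈ pvOrder
        · exact List.mem_append.mpr (Or.inl (List.mem_filter.mpr ⟨ho, by simpa using (PySem.List.mem_dedup a t).mp ht⟩))
        · exact List.mem_append.mpr (Or.inr (List.mem_filter.mpr ⟨ht, by simpa using ho⟩))
    · rw [List.nodup_append]
      refine ⟨pvOrder_nodup.filter _, (PySem.List.nodup_dedup a).filter _, ?_⟩
      intro s hs t ht
      rintro rfl
      exact (hmemE ht).2 (hmemF hs).1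
  have hpair : (F ++ E).Pairwise (fun s t => pvKey U s < pvKey U t) := by
    rw [List.pairwise_append]
    refine ⟨?_, ?_, ?_⟩
    · have := (pv_pairwise_rank pvOrder pvOrder_nodup).sublist (List.filter_sublist (l := pvOrder) (p := fun t => decide (t ∈ a)))
      refine this.imp_of_mem ?_
      intro s t hs ht hlt
      have hso := (hmemF hs).1
      have hto := (hmemF ht).1
      simp only [pvKey, if_pos hso, if_pos hto]
      exact_mod_cast hlt
    · have := (pv_pairwise_rank U (PySem.List.nodup_dedup a)).sublist (List.filter_sublist (l := U) (p := fun t => decide (t ∉ pvOrder)))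
      refine this.imp_of_mem ?_
      intro s t hs ht hlt
      have hso := (hmemE hs).2
      have hto := (hmemE ht).2
      simp only [pvKey, if_neg hso, if_neg hto]
      omega
    · intro s hs t ht
      have hso := (hmemF hs).1
      have hto := (hmemE ht).2
      simp only [pvKey, if_pos hso, if_neg hto]
      rcases Option.isSome_iff_exists.mp ((PySem.List.index?_isSome_iff pvOrder s).mpr hso) with ⟨k, hk⟩
      rcases PySem.List.getElem_of_index?_eq_some hk with ⟨hklt, -, -⟩
      rw [hk]
      simp only [Option.getD_some]
      omega
  show PySem.List.sorted U (pvKey U) false = F ++ E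
  exact PySem.List.sorted_eq_of_perm_of_pairwise_lt U (F ++ E) (pvKey U) hperm hpair

-- ===== VERDICT (by name: the statement is the Claim_ definition above) =====
theorem get_ordered_technologies_spec : Claim_equal_get_ordered_technologies := by
  intro a _
  unfold Spec_get_ordered_technologies
  rw [pv_A_eq, pv_B_eq]
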